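-- pv_equiv track=rewrite | github.com/gohefd321/us-stock-trading-bot | backend/app/services/yahoo_finance_service.py | _analyze_headline_sentiment
-- ===== SOURCE A (Python) =====
-- def _analyze_headline_sentiment(headline: str) -> str:
--     """
--     Analyze sentiment from headline
--
--     Args:
--         headline: News headline
--
--     Returns:
--         'positive', 'negative', or 'neutral'
--     """
--     headline_lower = headline.lower()
--
--     positive_words = [
--         'surge', 'rally', 'gain', 'rise', 'jump', 'soar', 'climb',
--         'profit', 'beat', 'strong', 'growth', 'boost', 'upgrade',
--         'outperform', 'win', 'success', 'breakthrough', 'record'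
--     ]
--
--     negative_words = [
--         'fall', 'drop', 'plunge', 'decline', 'loss', 'miss', 'weak',
--         'crash', 'slump', 'tumble', 'downgrade', 'concern', 'risk',
--         'warning', 'disappointing', 'fail', 'struggle', 'trouble'
--     ]
--
--     positive_count = sum(1 for word in positive_words if word in headline_lower)
--     negative_count = sum(1 for word in negative_words if word in headline_lower)
--
--     if positive_count > negative_count:
--         return 'positive'
--     elif negative_count > positive_count:
--         return 'negative'
--     else:
--         return 'neutral'
-- ===== SOURCE B (Python) =====
-- def _analyze_headline_sentiment(headline: str) -> str:
--     headline_lower = headline.lower()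
--
--     positive_words = [
--         'surge', 'rally', 'gain', 'rise', 'jump', 'soar', 'climb',
--         'profit', 'beat', 'strong', 'growth', 'boost', 'upgrade',
--         'outperform', 'win', 'success', 'breakthrough', 'record'
--     ]
--
--     negative_words = [
--         'fall', 'drop', 'plunge', 'decline', 'loss', 'miss', 'weak',
--         'crash', 'slump', 'tumble', 'downgrade', 'concern', 'risk',
--         'warning', 'disappointing', 'fail', 'struggle', 'trouble'
--     ]
--
--     keywords = positive_words + negative_words
--
--     # Text-driven scan: at each position of the headline, record which keywords
--     # start there; 'found' ends up as the set of distinct keywords present.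
--     found = set()
--     for i in range(len(headline_lower)):
--         for word in keywords:
--             if headline_lower.startswith(word, i):
--                 found.add(word)
--
--     balance = 0
--     for word in found:
--         balance += 1 if word in positive_words else -1
--
--     return 'positive' if balance > 0 else 'negative' if balance < 0 else 'neutral'
-- ===== Notes on version B (the rewrite author's own statement) =====
-- stated objective: alternative
-- what changed: A scans the keyword lists with per-word substring tests and compares two counts; B scans the headline text position by position, collecting into a set the distinct keywords that start at each position (multi-pattern text-driven matching), then classifies by the sign of a +/-1 balance over that set.
import Mathlib
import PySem

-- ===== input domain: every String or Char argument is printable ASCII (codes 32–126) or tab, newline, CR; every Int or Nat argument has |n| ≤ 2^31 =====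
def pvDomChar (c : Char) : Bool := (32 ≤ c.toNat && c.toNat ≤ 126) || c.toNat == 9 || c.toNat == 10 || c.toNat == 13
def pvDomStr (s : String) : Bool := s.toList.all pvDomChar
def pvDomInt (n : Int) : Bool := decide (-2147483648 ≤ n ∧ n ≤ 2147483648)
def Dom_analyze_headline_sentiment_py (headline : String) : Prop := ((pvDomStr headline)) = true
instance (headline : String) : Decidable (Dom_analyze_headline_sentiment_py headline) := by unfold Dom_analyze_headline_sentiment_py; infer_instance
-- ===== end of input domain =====

-- ===== PORT A =====
-- B replaces A's per-keyword substring counting with a position-by-position scan of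
-- the text collecting the set of keywords present; objective: alternative algorithm.
def pvPosWords : List String :=
  ["surge", "rally", "gain", "rise", "jump", "soar", "climb",
   "profit", "beat", "strong", "growth", "boost", "upgrade",
   "outperform", "win", "success", "breakthrough", "record"]

def pvNegWords : List String :=
  ["fall", "drop", "plunge", "decline", "loss", "miss", "weak",
   "crash", "slump", "tumble", "downgrade", "concern", "risk",
   "warning", "disappointing", "fail", "struggle", "trouble"]

def analyze_headline_sentiment_py (headline : String) : String :=
  let headline_lower := PySem.Str.lower headline
  let positive_count : Int :=
    pvPosWords.foldl (fun acc w => if PySem.Str.isIn w headline_lower then acc + 1 else acc) 0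
  let negative_count : Int :=
    pvNegWords.foldl (fun acc w => if PySem.Str.isIn w headline_lower then acc + 1 else acc) 0
  if positive_count > negative_count then "positive"
  else if negative_count > positive_count then "negative"
  else "neutral"

-- ===== PORT B =====
-- 'keywords = positive_words + negative_words'
def pvAllWords : List String := pvPosWords ++ pvNegWords

def analyze_headline_sentiment_py_alt (headline : String) : String :=
  let headline_lower := PySem.Str.lower headline
  let cs := headline_lower.toList
  -- 'headline_lower.startswith(word, i)' is ported by hand as a prefix test on the
  -- characters from position i on (exact for the nonnegative i produced by range(len)).
  let found : PySem.Set String :=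
    (List.range cs.length).foldl
      (fun fs i =>
        pvAllWords.foldl
          (fun fs w => if w.toList.isPrefixOf (cs.drop i) then fs.add w else fs) fs)
      PySem.Set.empty
  -- sum of ±1 over the set: order-independent, so folding the Set's list is exact
  let balance : Int :=
    found.foldl (fun b w => if pvPosWords.contains w then b + 1 else b - 1) 0
  if balance > 0 then "positive" else if balance < 0 then "negative" else "neutral"

-- ===== PRECONDITION & SPEC =====
def Spec_analyze_headline_sentiment_py (headline : String) (out : String) : Prop := out = analyze_headline_sentiment_py_alt headline
instance (headline : String) (out : String) : Decidable (Spec_analyze_headline_sentiment_py headline out) := by unfold Spec_analyze_headline_sentiment_py; infer_instance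

-- ===== CLAIM (what is proved, stated in full; the proofs are below) =====
def Claim_equal_analyze_headline_sentiment_py : Prop := ∀ (headline : String), Dom_analyze_headline_sentiment_py headline → Spec_analyze_headline_sentiment_py headline (analyze_headline_sentiment_py headline)

-- ===== LEMMAS AND PROOFS =====

-- membership in the inner (per-position) conditional-add fold
theorem pv_mem_inner_fold (p : String → Bool) (ws : List String) (fs : PySem.Set String)
    (x : String) :
    (x ∈ ws.foldl (fun fs w => if p w then fs.add w else fs) fs) ↔
      x ∈ fs ∨ (x ∈ ws ∧ p x = true) := by
  induction ws generalizing fs with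
  | nil => simp
  | cons w ws ih =>
    simp only [List.foldl_cons, ih]
    by_cases hp : p w = true
    · simp only [hp, if_pos]
      rw [PySem.Set.mem_add]
      constructor
      · rintro ((h | rfl) | ⟨hm, hx⟩)
        · exact Or.inl h
        · exact Or.inr ⟨List.mem_cons_self .., hp⟩
        · exact Or.inr ⟨List.mem_cons_of_mem _ hm, hx⟩
      · rintro (h | ⟨hm, hx⟩)
        · exact Or.inl (Or.inl h)
        · rcases List.mem_cons.1 hm with rfl | hm
          · exact Or.inl (Or.inr rfl)
          · exact Or.inr ⟨hm, hx⟩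
    · simp only [hp, if_neg, Bool.false_eq_true]
      constructor
      · rintro (h | ⟨hm, hx⟩)
        · exact Or.inl h
        · exact Or.inr ⟨List.mem_cons_of_mem _ hm, hx⟩
      · rintro (h | ⟨hm, hx⟩)
        · exact Or.inl h
        · rcases List.mem_cons.1 hm with rfl | hm
          · exact absurd hx hp
          · exact Or.inr ⟨hm, hx⟩

theorem pv_nodup_inner_fold (p : String → Bool) (ws : List String) (fs : PySem.Set String)
    (h : fs.Nodup) :
    (ws.foldl (fun fs w => if p w then fs.add w else fs) fs).Nodup := by
  induction ws generalizing fs with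
  | nil => exact h
  | cons w ws ih =>
    simp only [List.foldl_cons]
    split
    · exact ih _ (PySem.Set.nodup_add fs w h)
    · exact ih _ h

-- membership in the outer (over text positions) fold
theorem pv_mem_found (cs : List Char) (n : Nat) (fs : PySem.Set String) (x : String) :
    (x ∈ (List.range n).foldl
        (fun fs i => pvAllWords.foldl
          (fun fs w => if w.toList.isPrefixOf (cs.drop i) then fs.add w else fs) fs) fs) ↔
      x ∈ fs ∨ (x ∈ pvAllWords ∧ ∃ i < n, x.toList.isPrefixOf (cs.drop i) = true) := by
  induction n generalizing fs with
  | zero => simp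
  | succ n ih =>
    rw [List.range_succ, List.foldl_append, List.foldl_cons, List.foldl_nil,
      pv_mem_inner_fold, ih]
    constructor
    · rintro ((h | ⟨hm, i, hi, hp⟩) | ⟨hm, hp⟩)
      · exact Or.inl h
      · exact Or.inr ⟨hm, i, Nat.lt_succ_of_lt hi, hp⟩
      · exact Or.inr ⟨hm, n, Nat.lt_succ_self n, hp⟩
    · rintro (h | ⟨hm, i, hi, hp⟩)
      · exact Or.inl (Or.inl h)
      · rcases Nat.lt_succ_iff_lt_or_eq.1 hi with hi | rfl
        · exact Or.inl (Or.inr ⟨hm, i, hi, hp⟩)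
        · exact Or.inr ⟨hm, hp⟩

theorem pv_nodup_found (cs : List Char) (n : Nat) (fs : PySem.Set String) (h : fs.Nodup) :
    ((List.range n).foldl
        (fun fs i => pvAllWords.foldl
          (fun fs w => if w.toList.isPrefixOf (cs.drop i) then fs.add w else fs) fs) fs).Nodup := by
  induction n generalizing fs with
  | zero => exact h
  | succ n ih =>
    rw [List.range_succ, List.foldl_append, List.foldl_cons, List.foldl_nil]
    exact pv_nodup_inner_fold _ _ _ (ih _ h)

-- for nonempty w, "w starts at some scanned position" = "w in cs"
theorem pv_exists_pos_iff_isIn (w cs : List Char) (hw : w ≠ []) :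
    (∃ i < cs.length, w.isPrefixOf (cs.drop i) = true) ↔ PySem.Chars.isIn w cs = true := by
  rw [← PySem.Chars.exists_prefix_drop_iff_isIn]
  constructor
  · rintro ⟨i, _, hp⟩
    exact ⟨i, List.isPrefixOf_iff_prefix.1 hp⟩
  · rintro ⟨j, hp⟩
    by_cases hj : j < cs.length
    · exact ⟨j, hj, List.isPrefixOf_iff_prefix.2 hp⟩
    · rw [List.drop_eq_nil_of_le (Nat.le_of_not_lt hj)] at hp
      exact absurd (List.prefix_nil.1 hp) hw

-- a fold of a ±1 balance counts hits minus misses on lists of all-hits / all-misses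
theorem pv_foldl_all_pos (l : List String) (b : Int)
    (h : ∀ w ∈ l, pvPosWords.contains w = true) :
    l.foldl (fun b w => if pvPosWords.contains w then b + 1 else b - 1) b = b + l.length := by
  induction l generalizing b with
  | nil => simp
  | cons w l ih =>
    rw [List.foldl_cons, if_pos (h w (List.mem_cons_self ..)),
      ih _ (fun w hw => h w (List.mem_cons_of_mem _ hw))]
    simp only [List.length_cons]; push_cast; ring

theorem pv_foldl_all_neg (l : List String) (b : Int)
    (h : ∀ w ∈ l, pvPosWords.contains w = false) :
    l.foldl (fun b w => if pvPosWords.contains w then b + 1 else b - 1) b = b - l.length := by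
  induction l generalizing b with
  | nil => simp
  | cons w l ih =>
    simp only [List.foldl_cons, h w (List.mem_cons_self ..), Bool.false_eq_true, if_false]
    rw [ih _ (fun w hw => h w (List.mem_cons_of_mem _ hw))]
    simp only [List.length_cons]; push_cast; ring

-- keyword facts (finite: by decide)
theorem pv_words_nonempty : ∀ x ∈ pvAllWords, x.toList ≠ [] := by decide

theorem pv_neg_not_pos : ∀ x ∈ pvNegWords, pvPosWords.contains x = false := by decide

theorem pv_all_nodup : pvAllWords.Nodup := by decide

-- A's hit-count folds are countP
theorem pv_count_fold (ws : List String) (hl : String) (a : Int) :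
    ws.foldl (fun acc w => if PySem.Str.isIn w hl then acc + 1 else acc) a
      = a + (ws.countP (fun w => PySem.Str.isIn w hl) : Int) := by
  induction ws generalizing a with
  | nil => simp
  | cons w ws ih =>
    simp only [List.foldl_cons, List.countP_cons, ih]
    split_ifs <;> push_cast <;> ring

-- ===== VERDICT (by name: the statement is the Claim_ definition above) =====
theorem analyze_headline_sentiment_py_spec : Claim_equal_analyze_headline_sentiment_py := by
  intro headline _
  unfold Spec_analyze_headline_sentiment_py
  unfold analyze_headline_sentiment_py analyze_headline_sentiment_py_alt
  dsimp only
  set hl := PySem.Str.lower headline with hhl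
  set cs := hl.toList with hcs
  set pred : String → Bool := fun w => PySem.Str.isIn w hl with hpred
  set found := (List.range cs.length).foldl
      (fun fs i => pvAllWords.foldl
        (fun fs w => if w.toList.isPrefixOf (cs.drop i) then fs.add w else fs) fs)
      PySem.Set.empty with hfound
  have hmem : ∀ x, x ∈ found ↔ x ∈ pvAllWords ∧ pred x = true := by
    intro x
    rw [hfound, pv_mem_found]
    constructor
    · rintro (h | ⟨hm, hp⟩)
      · exact absurd h List.not_mem_nil
      · refine ⟨hm, ?_⟩
        have := (pv_exists_pos_iff_isIn x.toList cs (pv_words_nonempty x hm)).1 hp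
        simpa [hpred, PySem.Str.isIn, hcs] using this
    · rintro ⟨hm, hp⟩
      refine Or.inr ⟨hm, (pv_exists_pos_iff_isIn x.toList cs (pv_words_nonempty x hm)).2 ?_⟩
      simpa [hpred, PySem.Str.isIn, hcs] using hp
  have hnd : found.Nodup := pv_nodup_found cs _ _ List.nodup_nil
  have hperm : found.Perm (pvAllWords.filter pred) := by
    rw [List.perm_ext_iff_of_nodup hnd (pv_all_nodup.filter pred)]
    intro a
    rw [hmem, List.mem_filter]
  haveI : RightCommutative (fun (b : Int) (w : String) =>
      if pvPosWords.contains w then b + 1 else b - 1) := by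
    constructor
    intro b x y
    split_ifs <;> ring
  have hbal := hperm.foldl_eq (f := fun (b : Int) (w : String) =>
      if pvPosWords.contains w then b + 1 else b - 1) 0
  rw [hbal]
  rw [pvAllWords, List.filter_append, List.foldl_append]
  rw [pv_foldl_all_pos _ 0 (fun w hw => by
    simpa using List.elem_iff.2 (List.mem_of_mem_filter hw))]
  rw [pv_foldl_all_neg _ _ (fun w hw => pv_neg_not_pos w (List.mem_of_mem_filter hw))]
  rw [← List.countP_eq_length_filter, ← List.countP_eq_length_filter]
  rw [pv_count_fold, pv_count_fold]
  set P := pvPosWords.countP pred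
  set N := pvNegWords.countP pred
  split_ifs <;> first | rfl | omega
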